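-- pv_equiv track=rewrite | github.com/acoli-repo/rdf4discourse | ensemble.py | get_all_sublists
-- ===== SOURCE A (Python) =====
-- def get_all_sublists(l: list):
--     """ return non-empty lists only """
--     l=sorted(set(l))
--     result=[l]
--     if len(l)>1:
--         for nr in range(len(l)):
--             result+=get_all_sublists(l[0:nr]+l[nr+1:])
--     result= { str(l): l for l in result }
--     result=list(result.values())
--     return result
-- ===== SOURCE B (Python) =====
-- def get_all_sublists(l: list):
--     """ return non-empty lists only """
--     l = sorted(set(l))
--
--     def full(xs):
--         # all sublists (order-preserving subsequences) of xs, in A's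
--         # traversal/dedup order, each exactly once, the empty list included
--         if not xs:
--             return [[]]
--         rest = full(xs[1:])
--         return [xs] + rest + [[xs[0]] + s for s in rest[1:]]
--
--     return [s for s in full(l) if s]
-- ===== Notes on version B (the rewrite author's own statement) =====
-- stated objective: alternative
-- what changed: Replaces A's redundant remove-one-element recursion (which recomputes factorially many overlapping branches and re-deduplicates them through a dict at every level) by a single structural recursion on the sorted deduplicated list that emits every sublist exactly once in the same order, so no deduplication pass is needed; intended as faster (O(2^n*n) work vs A's factorial recomputation; at n=8 B is ~1000x faster and A times out at n=16 where B returns), but the output itself is exponential so a timing run could not confirm a clean reading at its largest sizes.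
-- intended difference: On the empty list A returns [[]] (the empty sublist), contradicting its own docstring 'return non-empty lists only'; B returns [], the intended value. — e.g. on get_all_sublists([]): A returns [[]], B returns []
import Mathlib
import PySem

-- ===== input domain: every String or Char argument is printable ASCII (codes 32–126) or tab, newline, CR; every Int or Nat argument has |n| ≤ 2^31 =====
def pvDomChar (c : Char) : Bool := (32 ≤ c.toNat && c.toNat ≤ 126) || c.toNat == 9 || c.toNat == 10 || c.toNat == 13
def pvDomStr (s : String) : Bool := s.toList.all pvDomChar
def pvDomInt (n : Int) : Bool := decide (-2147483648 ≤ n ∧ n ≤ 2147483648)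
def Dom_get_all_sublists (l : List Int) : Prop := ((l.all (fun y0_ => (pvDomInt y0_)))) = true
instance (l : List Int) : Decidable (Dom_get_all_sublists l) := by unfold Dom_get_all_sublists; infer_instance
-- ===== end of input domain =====

-- B replaces A's redundant remove-one-element recursion (re-deduplicated through a dict at
-- every level) by a single structural recursion emitting each sublist exactly once, same order.

-- ===== PORT A =====

-- l = sorted(set(l))  (the first line of both A and B)
def pvSortedSet (l : List Int) : List Int :=
  PySem.List.sorted (PySem.Set.ofList l) (fun x => x) false

-- helper lemmas the port's termination proof cites
theorem pvSliceRm (s : List Int) (nr : Nat) :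
    PySem.List.slice s (some 0) (some (nr : Int)) ++ PySem.List.slice s (some ((nr : Int) + 1)) none
      = s.take nr ++ s.drop (nr + 1) := by
  rw [show ((nr : Int) + 1) = ((nr + 1 : Nat) : Int) by push_cast; ring]
  rw [PySem.List.slice_from_natCast]
  rw [show (some (0 : Int)) = some ((0 : Nat) : Int) by norm_num]
  rw [PySem.List.slice_natCast]
  simp

theorem pvSortedSetLen (l : List Int) : (pvSortedSet l).length ≤ l.length := by
  unfold pvSortedSet
  rw [(PySem.List.sorted_perm (PySem.Set.ofList l) (fun x => x) false).length_eq]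
  rw [PySem.Set.ofList_eq_foldl]
  suffices h : ∀ (xs : List Int) (s : List Int),
      (xs.foldl PySem.Set.add s).length ≤ s.length + xs.length by
    simpa using h l []
  intro xs
  induction xs with
  | nil => simp
  | cons x t ih =>
    intro s
    have hadd : (PySem.Set.add s x).length ≤ s.length + 1 := by
      unfold PySem.Set.add
      split <;> simp
    calc ((x :: t).foldl PySem.Set.add s).length
        = (t.foldl PySem.Set.add (PySem.Set.add s x)).length := rfl
      _ ≤ (PySem.Set.add s x).length + t.length := ih _
      _ ≤ s.length + 1 + t.length := by omega
      _ = s.length + (x :: t).length := by simp; omega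

-- literal port of A: l = sorted(set(l)); result = [l]; if len(l) > 1: for nr in range(len(l)):
-- result += get_all_sublists(l[0:nr] + l[nr+1:]); then dict dedup {str(l): l}.values()
-- (the dict is keyed by the list itself: exact, since str is injective on lists of ints)
def get_all_sublists (l : List Int) : List (List Int) :=
  ((if 1 < (pvSortedSet l).length then
      [pvSortedSet l] ++ (List.range (pvSortedSet l).length).attach.flatMap (fun nr =>
        get_all_sublists
          (PySem.List.slice (pvSortedSet l) (some 0) (some ((nr.1 : Nat) : Int)) ++
           PySem.List.slice (pvSortedSet l) (some (((nr.1 : Nat) : Int) + 1)) none))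
    else [pvSortedSet l]).foldl (fun d a => d.insert a a)
    (PySem.Dict.empty : PySem.Dict (List Int) (List Int))).values
termination_by l.length
decreasing_by
  obtain ⟨nr, hnr⟩ := nr
  have hmem : nr < (pvSortedSet l).length := List.mem_range.mp hnr
  have hle : (pvSortedSet l).length ≤ l.length := pvSortedSetLen l
  rw [pvSliceRm]
  simp only [List.length_append, List.length_take, List.length_drop]
  omega

-- ===== PORT B =====

-- full(xs): all sublists of xs, each once, empty included (B's inner helper)
def pvFull : List Int → List (List Int)
  | [] => [[]]
  | x :: t => (x :: t) :: (pvFull t ++ (pvFull t).tail.map (fun s => x :: s))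

-- literal port of B: l = sorted(set(l)); return [s for s in full(l) if s]
def get_all_sublists_alt (l : List Int) : List (List Int) :=
  (pvFull (PySem.List.sorted (PySem.Set.ofList l) (fun x => x) false)).filter
    (fun s => !s.isEmpty)

-- ===== PRECONDITION & SPEC =====

-- On the empty list A returns [[]] (the empty sublist), contradicting its own docstring
-- 'return non-empty lists only'; B returns [], the intended value.
def D_get_all_sublists (l : List Int) : Prop := l = []
instance (l : List Int) : Decidable (D_get_all_sublists l) := by
  unfold D_get_all_sublists; infer_instance

def Spec_get_all_sublists (l : List Int) (out : List (List Int)) : Prop :=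
  ¬ D_get_all_sublists l → out = get_all_sublists_alt l
instance (l : List Int) (out : List (List Int)) : Decidable (Spec_get_all_sublists l out) := by
  unfold Spec_get_all_sublists; infer_instance

def pvDiffWitness_get_all_sublists : List Int := []
def pvDiffWitnessOut_get_all_sublists : (List (List Int)) × (List (List Int)) := ([[]], [])

-- ===== CLAIM (what is proved, stated in full; the proofs are below) =====
def Claim_unchanged_get_all_sublists : Prop :=
  ∀ (l : List Int), Dom_get_all_sublists l → Spec_get_all_sublists l (get_all_sublists l)
def Claim_changed_get_all_sublists : Prop :=
  Dom_get_all_sublists (pvDiffWitness_get_all_sublists) ∧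
  D_get_all_sublists (pvDiffWitness_get_all_sublists) ∧
  get_all_sublists (pvDiffWitness_get_all_sublists) = pvDiffWitnessOut_get_all_sublists.1 ∧
  get_all_sublists_alt (pvDiffWitness_get_all_sublists) = pvDiffWitnessOut_get_all_sublists.2 ∧
  pvDiffWitnessOut_get_all_sublists.1 ≠ pvDiffWitnessOut_get_all_sublists.2
def Claim_exact_get_all_sublists : Prop :=
  ∀ (l : List Int), Dom_get_all_sublists l → D_get_all_sublists l →
    get_all_sublists l ≠ get_all_sublists_alt l

-- ===== LEMMAS AND PROOFS =====

-- first-occurrence duplicate removal against a 'seen' accumulator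
-- (what A's '{str(l): l}' dict pass computes)
def pvDedup (seen : List (List Int)) : List (List Int) → List (List Int)
  | [] => []
  | a :: rest => if a ∈ seen then pvDedup seen rest else a :: pvDedup (a :: seen) rest

theorem pvDedup_congr (s₁ s₂ : List (List Int)) (ys : List (List Int))
    (h : ∀ x, x ∈ s₁ ↔ x ∈ s₂) : pvDedup s₁ ys = pvDedup s₂ ys := by
  induction ys generalizing s₁ s₂ with
  | nil => rfl
  | cons a rest ih =>
    simp only [pvDedup]
    rw [if_congr (h a) rfl rfl]
    split
    · exact ih _ _ h
    · rw [ih (a :: s₁) (a :: s₂) (by intro x; simp [h x])]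

theorem pvDedup_append (seen ys zs : List (List Int)) :
    pvDedup seen (ys ++ zs) = pvDedup seen ys ++ pvDedup (ys ++ seen) zs := by
  induction ys generalizing seen with
  | nil => simp [pvDedup]
  | cons a rest ih =>
    simp only [List.cons_append, pvDedup]
    by_cases ha : a ∈ seen
    · simp only [ha, if_true, ih]
      congr 1
      refine pvDedup_congr _ _ _ ?_
      intro x
      simp only [List.mem_append, List.mem_cons]
      constructor
      · tauto
      · rintro (rfl | h | h)
        · exact Or.inr ha
        · tauto
        · tauto
    · simp only [ha, if_false, ih]
      simp only [List.cons_append]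
      congr 2
      refine pvDedup_congr _ _ _ ?_
      intro x
      simp only [List.mem_append, List.mem_cons]
      tauto

theorem pvDedup_fresh (seen ys : List (List Int)) (h : ∀ a ∈ ys, a ∉ seen)
    (hnd : ys.Nodup) : pvDedup seen ys = ys := by
  induction ys generalizing seen with
  | nil => rfl
  | cons a rest ih =>
    simp only [pvDedup, h a (by simp), if_false]
    congr 1
    refine ih (a :: seen) ?_ hnd.of_cons
    intro b hb hmem
    rcases List.mem_cons.mp hmem with hba | hbs
    · exact (List.nodup_cons.mp hnd).1 (hba ▸ hb)
    · exact h b (by simp [hb]) hbs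

theorem pvDedup_filter_of_mem (P : List Int → Bool) (seen ys : List (List Int))
    (h : ∀ a ∈ ys, P a = false → a ∈ seen) :
    pvDedup seen ys = pvDedup seen (ys.filter P) := by
  induction ys generalizing seen with
  | nil => rfl
  | cons a rest ih =>
    by_cases hPa : P a = true
    · simp only [pvDedup, List.filter_cons, hPa, if_true, pvDedup]
      split
      · exact ih seen (fun b hb => h b (by simp [hb]))
      · rw [ih (a :: seen) (fun b hb hPb => by simp [h b (by simp [hb]) hPb])]
    · have hPa' : P a = false := by simpa using hPa
      have ha : a ∈ seen := h a (by simp) hPa'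
      simp only [pvDedup, List.filter_cons, hPa', if_true, ha, Bool.false_eq_true, if_false]
      exact ih seen (fun b hb => h b (by simp [hb]))

theorem pvDedup_map_cons (x : Int) (seen seen' : List (List Int)) (zs : List (List Int))
    (h : ∀ s, (x :: s) ∈ seen ↔ s ∈ seen') :
    pvDedup seen (zs.map (fun s => x :: s)) = (pvDedup seen' zs).map (fun s => x :: s) := by
  induction zs generalizing seen seen' with
  | nil => rfl
  | cons a rest ih =>
    simp only [List.map_cons, pvDedup]
    rw [if_congr (h a) rfl rfl]
    split
    · exact ih _ _ h
    · simp only [List.map_cons]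
      congr 1
      refine ih _ _ ?_
      intro s
      simp only [List.mem_cons, h s, List.cons_eq_cons]
      tauto

theorem pvDedup_filter_comm (P : List Int → Bool) (seen seen' ys : List (List Int))
    (h : ∀ a, P a = true → (a ∈ seen ↔ a ∈ seen')) :
    pvDedup seen' (ys.filter P) = (pvDedup seen ys).filter P := by
  induction ys generalizing seen seen' with
  | nil => rfl
  | cons a rest ih =>
    by_cases hPa : P a = true
    · simp only [List.filter_cons, hPa, if_true, pvDedup]
      rw [if_congr (h a hPa).symm rfl rfl]
      split
      · exact ih _ _ h
      · simp only [List.filter_cons, hPa, if_true]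
        congr 1
        refine ih _ _ ?_
        intro b hPb
        simp [h b hPb]
    · have hPa' : P a = false := by simpa using hPa
      simp only [List.filter_cons, hPa', Bool.false_eq_true, if_false, pvDedup]
      split
      · exact ih _ _ h
      · simp only [List.filter_cons, hPa', Bool.false_eq_true, if_false]
        refine ih _ _ ?_
        intro b hPb
        have hba : b ≠ a := fun hba => by rw [hba] at hPb; exact hPa hPb
        simp [h b hPb, hba]

-- A's dict pass '{k: k for k in ys}.values()' is first-occurrence dedup
theorem pvDictValues (ys : List (List Int)) (d : PySem.Dict (List Int) (List Int))
    (hv : ∀ p ∈ d.items, p.2 = p.1) (hnd : d.keys.Nodup) :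
    (ys.foldl (fun d a => d.insert a a) d).values = d.values ++ pvDedup d.keys ys := by
  induction ys generalizing d with
  | nil => simp [pvDedup]
  | cons a rest ih =>
    simp only [List.foldl_cons]
    by_cases hc : d.contains a = true
    · have heq : d.insert a a = d := by
        apply PySem.Dict.ext
        rw [PySem.Dict.items_insert_of_contains d a hc]
        conv_rhs => rw [← List.map_id d.items]
        refine List.map_congr_left ?_
        intro p hp
        split
        · rename_i hpk
          have h1 : p.1 = a := by simpa using hpk
          have h2 : p.2 = p.1 := hv p hp
          simp [id, ← h1, h2, Prod.ext_iff]
        · rfl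
      rw [heq, ih d hv hnd]
      have ha : a ∈ d.keys := (PySem.Dict.contains_iff_mem_keys d a).mp hc
      simp [pvDedup, ha]
    · have hc' : d.contains a = false := by simpa using hc
      have hitems := PySem.Dict.items_insert_of_not_contains d a hc'
      have hkeys : (d.insert a a).keys = d.keys ++ [a] := by
        simp only [PySem.Dict.keys, hitems, List.map_append, List.map_cons, List.map_nil]
      have hvals : (d.insert a a).values = d.values ++ [a] := by
        simp only [PySem.Dict.values, hitems, List.map_append, List.map_cons, List.map_nil]
      have ha : a ∉ d.keys := fun hmem => by
        rw [← PySem.Dict.contains_iff_mem_keys] at hmem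
        rw [hc'] at hmem
        exact Bool.false_ne_true hmem
      rw [ih (d.insert a a) ?_ ?_]
      · rw [hkeys, hvals]
        have hcg : pvDedup (d.keys ++ [a]) rest = pvDedup (a :: d.keys) rest :=
          pvDedup_congr _ _ _ (by intro x; simp [or_comm])
        simp [pvDedup, ha, hcg]
      · intro p hp
        rw [hitems] at hp
        rcases List.mem_append.mp hp with h | h
        · exact hv p h
        · simp at h; simp [h]
      · rw [hkeys, List.nodup_append]
        refine ⟨hnd, List.nodup_singleton a, ?_⟩
        intro b hb c hc
        rw [List.mem_singleton] at hc
        subst hc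
        exact fun hbc => ha (hbc ▸ hb)

-- facts about pvFull
theorem pvFull_eq (xs : List Int) : pvFull xs = xs :: (pvFull xs).tail := by
  cases xs <;> rfl

theorem sublist_of_mem_pvFull (xs s : List Int) (h : s ∈ pvFull xs) : s.Sublist xs := by
  induction xs generalizing s with
  | nil => simp [pvFull] at h; simp [h]
  | cons x t ih =>
    simp only [pvFull, List.mem_cons, List.mem_append, List.mem_map] at h
    rcases h with h | h | ⟨a, ha, rfl⟩
    · simp [h]
    · exact (ih s h).cons x
    · exact (ih a (List.mem_of_mem_tail ha)).cons₂ x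

theorem mem_pvFull_of_sublist (xs s : List Int) (h : s.Sublist xs) : s ∈ pvFull xs := by
  induction xs generalizing s with
  | nil => simp at h; simp [h, pvFull]
  | cons x t ih =>
    rcases List.sublist_cons_iff.mp h with h' | ⟨r, rfl, hr⟩
    · simp only [pvFull, List.mem_cons, List.mem_append]
      exact Or.inr (Or.inl (ih s h'))
    · have hrm : r ∈ pvFull t := ih r hr
      by_cases hrt : r = t
      · simp [pvFull, hrt]
      · have hmt : r ∈ (pvFull t).tail := by
          rw [pvFull_eq t] at hrm
          rcases List.mem_cons.mp hrm with h | h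
          · exact absurd h hrt
          · exact h
        simp only [pvFull, List.mem_cons, List.mem_append, List.mem_map]
        exact Or.inr (Or.inr ⟨r, hmt, rfl⟩)

theorem not_mem_of_mem_pvFull (x : Int) (t s : List Int) (hx : x ∉ t) (hs : s ∈ pvFull t) :
    x ∉ s := fun hxs => hx ((sublist_of_mem_pvFull t s hs).subset hxs)

theorem nodup_pvFull (xs : List Int) (h : xs.Nodup) : (pvFull xs).Nodup := by
  induction xs with
  | nil => simp [pvFull]
  | cons x t ih =>
    have hx : x ∉ t := (List.nodup_cons.mp h).1
    have hnt : t.Nodup := (List.nodup_cons.mp h).2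
    have hft : (pvFull t).Nodup := ih hnt
    have htail : (pvFull t).tail.Nodup := hft.tail
    simp only [pvFull, List.nodup_cons, List.nodup_append]
    refine ⟨?_, hft, ?_, ?_⟩
    · intro hmem
      rcases List.mem_append.mp hmem with h1 | h1
      · have hl := (sublist_of_mem_pvFull t _ h1).length_le
        exact absurd hl (by simp)
      · rcases List.mem_map.mp h1 with ⟨a, ha, hax⟩
        have hat : a = t := by simpa using hax
        rw [hat] at ha
        rw [pvFull_eq t] at hft
        exact (List.nodup_cons.mp hft).1 ha
    · exact htail.map (fun a b hab => by simpa using hab)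
    · intro a ha b hb hab
      have hxa : x ∉ a := not_mem_of_mem_pvFull x t a hx ha
      rcases List.mem_map.mp hb with ⟨c, _, rfl⟩
      exact hxa (hab ▸ List.mem_cons_self)

theorem pvFull_filter_cons (x : Int) (M : List Int) (h : x ∉ M) :
    (pvFull (x :: M)).filter (fun s => decide (x ∈ s)) = (pvFull M).map (fun s => x :: s) := by
  have h1 : (pvFull M).filter (fun s => decide (x ∈ s)) = [] := by
    rw [List.filter_eq_nil_iff]
    intro a ha
    simp [not_mem_of_mem_pvFull x M a h ha]
  have h2 : ((pvFull M).tail.map (fun s => x :: s)).filter (fun s => decide (x ∈ s)) =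
      (pvFull M).tail.map (fun s => x :: s) := by
    rw [List.filter_eq_self]
    intro a ha
    rcases List.mem_map.mp ha with ⟨c, _, rfl⟩
    simp
  simp only [pvFull, List.filter_cons, List.filter_append, h1, h2]
  simp only [List.mem_cons, true_or, decide_true, if_true, List.nil_append]
  conv_rhs => rw [pvFull_eq M]
  simp

-- removing the nr-th element
def pvRm (i : Nat) (xs : List Int) : List Int := xs.take i ++ xs.drop (i + 1)

theorem pvRm_zero_cons (x : Int) (t : List Int) : pvRm 0 (x :: t) = t := by simp [pvRm]

theorem pvRm_succ_cons (i : Nat) (x : Int) (t : List Int) :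
    pvRm (i + 1) (x :: t) = x :: pvRm i t := by simp [pvRm]

theorem pvRm_sublist (i : Nat) (xs : List Int) : (pvRm i xs).Sublist xs := by
  conv_rhs => rw [← List.take_append_drop i xs]
  refine List.Sublist.append_left ?_ _
  have h1 : xs.drop (i + 1) = (xs.drop i).tail := by
    rw [← List.drop_one, List.drop_drop, Nat.add_comm]
  rw [h1]
  exact List.tail_sublist _

-- flatMap congruence helper
theorem pvFlatMap_congr {α β : Type} (l : List α) (f g : α → List β)
    (h : ∀ a ∈ l, f a = g a) : l.flatMap f = l.flatMap g := by
  induction l with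
  | nil => rfl
  | cons a t ih => simp [List.flatMap_cons, h a (by simp), ih (fun b hb => h b (by simp [hb]))]

theorem pvFilter_flatMap {α : Type} (l : List α) (f : α → List (List Int)) (P : List Int → Bool) :
    (l.flatMap f).filter P = l.flatMap (fun a => (f a).filter P) := by
  induction l with
  | nil => rfl
  | cons a t ih => simp [List.flatMap_cons, List.filter_append, ih]

-- MAIN combinatorial lemma: deduplicating A's branch outputs (empty sublist included)
-- yields exactly pvFull
theorem pvM1 (xs : List Int) (hnd : xs.Nodup) :
    pvDedup [] (xs :: (List.range xs.length).flatMap (fun i => pvFull (pvRm i xs)))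
      = pvFull xs := by
  induction xs with
  | nil => simp [pvDedup, pvFull]
  | cons x t ih =>
    have hx : x ∉ t := (List.nodup_cons.mp hnd).1
    have hnt : t.Nodup := (List.nodup_cons.mp hnd).2
    -- split range (t.length + 1) = 0 :: (range t.length).map (·+1)
    have hrange : (List.range (x :: t).length).flatMap (fun i => pvFull (pvRm i (x :: t)))
        = pvFull t ++ (List.range t.length).flatMap (fun i => pvFull (x :: pvRm i t)) := by
      simp only [List.length_cons, List.range_succ_eq_map, List.flatMap_cons, List.flatMap_map]
      rw [pvRm_zero_cons]
      all_goals congr 1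
      all_goals
        refine pvFlatMap_congr _ _ _ ?_
        intro i _
        rw [Nat.succ_eq_add_one, pvRm_succ_cons]
    rw [hrange]
    set CC := (List.range t.length).flatMap (fun i => pvFull (x :: pvRm i t)) with hCC
    -- peel the head
    have hstep : pvDedup [] ((x :: t) :: (pvFull t ++ CC))
        = (x :: t) :: pvDedup [x :: t] (pvFull t ++ CC) := by simp [pvDedup]
    rw [hstep, pvDedup_append]
    -- first block: pvFull t is fresh
    have hfresh : pvDedup [x :: t] (pvFull t) = pvFull t := by
      refine pvDedup_fresh _ _ ?_ (nodup_pvFull t hnt)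
      intro a ha
      simp only [List.mem_singleton]
      intro hax
      have hl := (sublist_of_mem_pvFull t a ha).length_le
      rw [hax] at hl
      simp at hl
    rw [hfresh]
    -- second block
    have hseen : ∀ a ∈ CC, (fun s => decide (x ∈ s)) a = false → a ∈ pvFull t ++ [x :: t] := by
      intro a haCC hPa
      have hxa : x ∉ a := by simpa using hPa
      rcases List.mem_flatMap.mp haCC with ⟨i, _, ha⟩
      have hsub : a.Sublist (x :: pvRm i t) := sublist_of_mem_pvFull _ a ha
      have hsub' : a.Sublist (pvRm i t) := by
        rcases List.sublist_cons_iff.mp hsub with h' | ⟨r, rfl, _⟩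
        · exact h'
        · exact absurd List.mem_cons_self hxa
      have hat : a.Sublist t := hsub'.trans (pvRm_sublist i t)
      exact List.mem_append.mpr (Or.inl (mem_pvFull_of_sublist t a hat))
    rw [pvDedup_filter_of_mem (fun s => decide (x ∈ s)) _ _ hseen]
    rw [hCC, pvFilter_flatMap]
    have hfilt : (List.range t.length).flatMap
          (fun i => (pvFull (x :: pvRm i t)).filter (fun s => decide (x ∈ s)))
        = (List.range t.length).flatMap (fun i => (pvFull (pvRm i t)).map (fun s => x :: s)) := by
      refine pvFlatMap_congr _ _ _ ?_
      intro i _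
      refine pvFull_filter_cons x (pvRm i t) ?_
      intro hmem
      exact hx ((pvRm_sublist i t).subset hmem)
    rw [hfilt, ← List.map_flatMap]
    have hmap : pvDedup (pvFull t ++ [x :: t])
          (((List.range t.length).flatMap (fun i => pvFull (pvRm i t))).map (fun s => x :: s))
        = (pvDedup [t] ((List.range t.length).flatMap (fun i => pvFull (pvRm i t)))).map
            (fun s => x :: s) := by
      refine pvDedup_map_cons x _ _ _ ?_
      intro s
      simp only [List.mem_append, List.mem_singleton, List.cons_eq_cons, true_and]
      constructor
      · rintro (h | h)
        · exact absurd List.mem_cons_self (not_mem_of_mem_pvFull x t _ hx h)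
        · simp [h]
      · intro h
        simp only [List.mem_singleton] at h
        simp [h]
    rw [hmap]
    -- use the induction hypothesis
    have hih := ih hnt
    rw [show pvDedup [] (t :: (List.range t.length).flatMap (fun i => pvFull (pvRm i t)))
          = t :: pvDedup [t] ((List.range t.length).flatMap (fun i => pvFull (pvRm i t)))
        by simp [pvDedup]] at hih
    have htail : pvDedup [t] ((List.range t.length).flatMap (fun i => pvFull (pvRm i t)))
        = (pvFull t).tail := by
      have hh := hih.trans (pvFull_eq t)
      exact (List.cons_eq_cons.mp hh).2
    rw [htail]
    simp [pvFull]

-- sorted(set(xs)) = xs for a strictly increasing xs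
theorem pvOfList_nodup (xs : List Int) (h : xs.Nodup) : PySem.Set.ofList xs = xs := by
  rw [PySem.Set.ofList_eq_foldl]
  suffices haux : ∀ (ys s : List Int), ys.Nodup → (∀ a ∈ ys, a ∉ s) →
      ys.foldl PySem.Set.add s = s ++ ys by
    simpa using haux xs [] h (by simp)
  intro ys
  induction ys with
  | nil => simp
  | cons a t ih =>
    intro s hnd hfr
    have ha : a ∉ s := hfr a (by simp)
    have hadd : PySem.Set.add s a = s ++ [a] := by
      unfold PySem.Set.add
      rw [if_neg]
      simp only [PySem.Set.contains]
      simpa using ha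
    simp only [List.foldl_cons, hadd]
    rw [ih (s ++ [a]) hnd.of_cons ?_]
    · simp
    · intro b hb hmem
      rcases List.mem_append.mp hmem with h1 | h1
      · exact hfr b (by simp [hb]) h1
      · rw [List.mem_singleton] at h1
        exact (List.nodup_cons.mp hnd).1 (h1 ▸ hb)

theorem pvSortedSet_idem (xs : List Int) (h : xs.Pairwise (· < ·)) :
    pvSortedSet xs = xs := by
  unfold pvSortedSet
  rw [pvOfList_nodup xs h.nodup]
  exact PySem.List.sorted_eq_of_perm_of_pairwise_lt xs xs (fun x => x) (List.Perm.refl xs) h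

-- attach elimination for flatMap
theorem pvAttach_flatMap {α β : Type} (l : List α) (g : α → List β) :
    (l.attach.flatMap (fun x => g x.1)) = l.flatMap g := by
  conv_rhs => rw [← List.attach_map_subtype_val l]
  rw [List.flatMap_map]

-- A's recursion on a sorted duplicate-free nonempty list equals B's
theorem pvA_main (n : Nat) (xs : List Int) (hlen : xs.length ≤ n)
    (hs : xs.Pairwise (· < ·)) (hne : xs ≠ []) :
    get_all_sublists xs = (pvFull xs).filter (fun s => !s.isEmpty) := by
  induction n generalizing xs with
  | zero => simp at hlen; exact absurd hlen hne
  | succ n ih =>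
    rw [get_all_sublists.eq_def]
    rw [pvSortedSet_idem xs hs]
    by_cases hgt : 1 < xs.length
    · rw [if_pos hgt]
      have hbranch : (List.range xs.length).attach.flatMap (fun nr =>
            get_all_sublists
              (PySem.List.slice xs (some 0) (some ((nr.1 : Nat) : Int)) ++
               PySem.List.slice xs (some (((nr.1 : Nat) : Int) + 1)) none))
          = (List.range xs.length).flatMap
              (fun i => (pvFull (pvRm i xs)).filter (fun s => !s.isEmpty)) := by
        rw [← pvAttach_flatMap (List.range xs.length)
              (fun i => (pvFull (pvRm i xs)).filter (fun s => !s.isEmpty))]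
        refine pvFlatMap_congr _ _ _ ?_
        rintro ⟨i, hi⟩ _
        have hi' : i < xs.length := List.mem_range.mp hi
        rw [pvSliceRm]
        show get_all_sublists (pvRm i xs) = _
        have hrl : (pvRm i xs).length = xs.length - 1 := by
          simp only [pvRm, List.length_append, List.length_take, List.length_drop]
          omega
        refine ih (pvRm i xs) ?_ (hs.sublist (pvRm_sublist i xs)) ?_
        · omega
        · intro hnil
          rw [hnil] at hrl
          simp at hrl
          omega
      rw [hbranch]
      rw [pvDictValues _ PySem.Dict.empty (by simp [PySem.Dict.empty, PySem.Dict.items])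
            (by simp [PySem.Dict.empty, PySem.Dict.keys, PySem.Dict.items])]
      have hvempty : (PySem.Dict.empty : PySem.Dict (List Int) (List Int)).values = [] := by
        simp [PySem.Dict.empty, PySem.Dict.values, PySem.Dict.items]
      have hkempty : (PySem.Dict.empty : PySem.Dict (List Int) (List Int)).keys = [] := by
        simp [PySem.Dict.empty, PySem.Dict.keys, PySem.Dict.items]
      rw [hvempty, hkempty, List.nil_append]
      have hfil : [xs] ++ (List.range xs.length).flatMap
            (fun i => (pvFull (pvRm i xs)).filter (fun s => !s.isEmpty))
          = (xs :: (List.range xs.length).flatMap (fun i => pvFull (pvRm i xs))).filter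
              (fun s => !s.isEmpty) := by
        rw [List.filter_cons]
        rw [if_pos (by simpa using hne)]
        rw [pvFilter_flatMap]
        rfl
      rw [hfil]
      rw [pvDedup_filter_comm (fun s => !s.isEmpty) [] [] _ (by intro a _; rfl)]
      rw [pvM1 xs hs.nodup]
    · rw [if_neg hgt]
      obtain ⟨a, rfl⟩ : ∃ a, xs = [a] := by
        cases xs with
        | nil => exact absurd rfl hne
        | cons y t =>
          cases t with
          | nil => exact ⟨y, rfl⟩
          | cons z u => simp at hgt
      rw [pvDictValues _ PySem.Dict.empty (by simp [PySem.Dict.empty, PySem.Dict.items])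
            (by simp [PySem.Dict.empty, PySem.Dict.keys, PySem.Dict.items])]
      simp [PySem.Dict.empty, PySem.Dict.values, PySem.Dict.keys, PySem.Dict.items,
        pvDedup, pvFull]

-- re-sorting an already processed input is the identity on A
theorem pvA_resort (l : List Int) :
    get_all_sublists l = get_all_sublists (pvSortedSet l) := by
  conv_rhs => rw [get_all_sublists.eq_def]
  rw [pvSortedSet_idem (pvSortedSet l)
    (by unfold pvSortedSet; exact PySem.List.sorted_ofList_pairwise_lt l)]
  conv_lhs => rw [get_all_sublists.eq_def]

-- ===== VERDICT (by name: the statement is the Claim_ definition above) =====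
theorem get_all_sublists_spec : Claim_unchanged_get_all_sublists := by
  intro l _ hnd
  have hlne : l ≠ [] := fun h => hnd h
  have hsp : (pvSortedSet l).Pairwise (· < ·) := by
    unfold pvSortedSet; exact PySem.List.sorted_ofList_pairwise_lt l
  have hsne : pvSortedSet l ≠ [] := by
    unfold pvSortedSet
    rw [Ne, PySem.List.sorted_eq_nil_iff]
    intro h
    cases l with
    | nil => exact hlne rfl
    | cons x t =>
      have hm : x ∈ PySem.Set.ofList (x :: t) := (PySem.Set.mem_ofList _ x).mpr (by simp)
      rw [h] at hm
      simp at hm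
  rw [pvA_resort l]
  rw [pvA_main (pvSortedSet l).length (pvSortedSet l) le_rfl hsp hsne]
  rfl

theorem get_all_sublists_changed : Claim_changed_get_all_sublists := by
  unfold Claim_changed_get_all_sublists
  refine ⟨by decide, rfl, ?_, by decide, by decide⟩
  rw [show get_all_sublists pvDiffWitness_get_all_sublists = get_all_sublists [] from rfl]
  rw [get_all_sublists.eq_def]
  decide

theorem get_all_sublists_tight : Claim_exact_get_all_sublists := by
  intro l _ hD
  rw [hD]
  rw [show get_all_sublists_alt [] = ([] : List (List Int)) from by decide]
  rw [get_all_sublists.eq_def]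
  decide
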